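-- pv_equiv track=rewrite | github.com/KavinSub/project-euler | p_347.py | prime_combinations
-- ===== SOURCE A (Python) =====
-- def prime_combinations(primes, max_v):
-- 	pairs = []
-- 	for i in range(len(primes) - 1):
-- 		for j in range(i + 1, len(primes)):
-- 			if primes[i] * primes[j] > max_v:
-- 				break
-- 			pairs.append((primes[i], primes[j]))
-- 	return pairs
-- ===== SOURCE B (Python) =====
-- def prime_combinations(primes, max_v):
-- 	blocks = [[] for _ in primes[:-1]]
-- 	alive = []
-- 	for j in range(1, len(primes)):
-- 		q = primes[j]
-- 		alive.append(j - 1)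
-- 		nxt = []
-- 		for i in alive:
-- 			if primes[i] * q <= max_v:
-- 				blocks[i].append((primes[i], q))
-- 				nxt.append(i)
-- 		alive = nxt
-- 	return [pair for block in blocks for pair in block]
-- ===== Notes on version B (the rewrite author's own statement) =====
-- stated objective: alternative
-- what changed: B transposes the iteration: instead of A's row-wise scan with break, it sweeps the right factor j once, maintaining a live set of left indices that are permanently dropped at their first over-limit product, collecting each row's pairs in per-row buckets concatenated in row order at the end.
import Mathlib
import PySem

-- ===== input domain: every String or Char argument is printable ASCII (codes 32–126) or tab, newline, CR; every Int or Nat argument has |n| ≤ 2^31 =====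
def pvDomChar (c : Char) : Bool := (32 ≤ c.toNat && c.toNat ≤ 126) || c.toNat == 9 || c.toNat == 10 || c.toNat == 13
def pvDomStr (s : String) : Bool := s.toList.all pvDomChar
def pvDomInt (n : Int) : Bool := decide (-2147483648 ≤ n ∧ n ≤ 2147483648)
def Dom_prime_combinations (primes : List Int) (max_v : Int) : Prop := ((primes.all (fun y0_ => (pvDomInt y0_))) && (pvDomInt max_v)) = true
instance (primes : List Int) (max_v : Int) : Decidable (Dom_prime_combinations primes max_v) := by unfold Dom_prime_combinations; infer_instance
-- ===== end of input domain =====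

-- B: instead of A's row-wise scan with break, sweep the right factor once, keeping a live set of
-- left indices (dropped for good at their first over-limit product) and per-row pair buckets
-- concatenated in row order at the end. Objective: alternative (same cost); return values proved equal.


-- ===== PORT A =====
-- inner 'for j in range(i+1, len(primes)): if primes[i]*primes[j] > max_v: break; append'
-- (pyGet? never returns none here: every j produced by pyRange is in range)
def innerA (p max_v : Int) (primes : List Int) : List Int → List (Int × Int)
  | [] => []
  | j :: js =>
    match PySem.List.pyGet? primes j with
    | none => []
    | some q => if p * q > max_v then [] else (p, q) :: innerA p max_v primes js

def prime_combinations (primes : List Int) (max_v : Int) : List (Int × Int) :=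
  (PySem.List.pyRange 0 ((primes.length : Int) - 1) 1).foldl
    (fun pairs i =>
      match PySem.List.pyGet? primes i with
      | none => pairs
      | some p => pairs ++ innerA p max_v primes (PySem.List.pyRange (i + 1) (primes.length : Int) 1))
    []

-- ===== PORT B =====
-- inner 'for i in alive: if primes[i] * q <= max_v: blocks[i].append(...); nxt.append(i)'
-- (every i in alive is a valid non-negative index, so pyGetD's default and i.toNat are never
-- actually clamping; state = (blocks, nxt))
def innerStepB (primes : List Int) (max_v q : Int)
    (bn : List (List (Int × Int)) × List Int) (i : Int) : List (List (Int × Int)) × List Int :=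
  if PySem.List.pyGetD primes i 0 * q ≤ max_v then
    (bn.1.modify i.toNat (fun b => b ++ [(PySem.List.pyGetD primes i 0, q)]), bn.2 ++ [i])
  else bn

-- one iteration of 'for j in range(1, len(primes))': q = primes[j]; alive.append(j-1); inner loop
def outerStepB (primes : List Int) (max_v : Int)
    (st : List (List (Int × Int)) × List Int) (j : Int) : List (List (Int × Int)) × List Int :=
  (st.2 ++ [j - 1]).foldl (innerStepB primes max_v (PySem.List.pyGetD primes j 0)) (st.1, [])

def prime_combinations_alt (primes : List Int) (max_v : Int) : List (Int × Int) :=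
  ((PySem.List.pyRange 1 (primes.length : Int) 1).foldl (outerStepB primes max_v)
    (primes.dropLast.map (fun _ => []), [])).1.flatten

-- ===== PRECONDITION & SPEC =====
def Spec_prime_combinations (primes : List Int) (max_v : Int) (out : List (Int × Int)) : Prop := out = prime_combinations_alt primes max_v
instance (primes : List Int) (max_v : Int) (out : List (Int × Int)) : Decidable (Spec_prime_combinations primes max_v out) := by unfold Spec_prime_combinations; infer_instance

-- ===== CLAIM (what is proved, stated in full; the proofs are below) =====
def Claim_equal_prime_combinations : Prop := ∀ (primes : List Int) (max_v : Int), Dom_prime_combinations primes max_v → Spec_prime_combinations primes max_v (prime_combinations primes max_v)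

-- ===== LEMMAS AND PROOFS =====

-- common specification: pairs of the head with the ≤-max_v prefix of the tail, then recurse
def specPairs (max_v p : Int) : List Int → List (Int × Int)
  | [] => []
  | q :: qs => if p * q > max_v then [] else (p, q) :: specPairs max_v p qs

def specAll (max_v : Int) : List Int → List (Int × Int)
  | [] => []
  | p :: rest => specPairs max_v p rest ++ specAll max_v rest

theorem innerA_eq (p max_v : Int) (primes : List Int) :
    ∀ k : Nat, k ≤ primes.length →
      innerA p max_v primes (PySem.List.pyRange (k : Int) (primes.length : Int) 1)
        = specPairs max_v p (primes.drop k) := by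
  intro k hk
  induction h : primes.length - k generalizing k with
  | zero =>
    have hk' : k = primes.length := by omega
    subst hk'
    rw [PySem.List.pyRange_one_eq_nil (by omega)]
    simp [innerA, specPairs, List.drop_eq_nil_of_le]
  | succ m ih =>
    have hlt : k < primes.length := by omega
    rw [PySem.List.pyRange_one_cons (by exact_mod_cast hlt)]
    have : ((k : Int) + 1) = ((k + 1 : Nat) : Int) := by push_cast; ring
    rw [this]
    have hdrop : primes.drop k = primes[k] :: primes.drop (k + 1) :=
      List.drop_eq_getElem_cons hlt
    simp only [innerA, PySem.List.pyGet?_natCast, List.getElem?_eq_getElem hlt]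
    rw [hdrop]
    simp only [specPairs]
    split
    · rfl
    · rw [ih (k + 1) (by omega) (by omega)]

theorem outerA_eq (max_v : Int) (primes : List Int) :
    ∀ (k : Nat) (acc : List (Int × Int)), k ≤ primes.length →
      (PySem.List.pyRange (k : Int) ((primes.length : Int) - 1) 1).foldl
        (fun pairs i =>
          match PySem.List.pyGet? primes i with
          | none => pairs
          | some p => pairs ++ innerA p max_v primes (PySem.List.pyRange (i + 1) (primes.length : Int) 1))
        acc
        = acc ++ specAll max_v (primes.drop k) := by
  intro k acc hk
  induction h : primes.length - k generalizing k acc with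
  | zero =>
    have hk' : k = primes.length := by omega
    subst hk'
    rw [PySem.List.pyRange_one_eq_nil (by omega)]
    simp [specAll, List.drop_eq_nil_of_le]
  | succ m ih =>
    have hlt : k < primes.length := by omega
    by_cases hlast : k + 1 = primes.length
    · rw [PySem.List.pyRange_one_eq_nil (by omega)]
      have hdrop : primes.drop k = primes[k] :: primes.drop (k + 1) :=
        List.drop_eq_getElem_cons hlt
      rw [List.foldl_nil, hdrop, List.drop_eq_nil_of_le (by omega)]
      simp [specAll, specPairs]
    · rw [PySem.List.pyRange_one_cons (by omega)]
      rw [List.foldl_cons]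
      simp only [PySem.List.pyGet?_natCast, List.getElem?_eq_getElem hlt]
      have hstep : ((k : Int) + 1) = ((k + 1 : Nat) : Int) := by push_cast; ring
      rw [hstep, ih (k + 1) _ (by omega) (by omega),
          innerA_eq _ _ _ (k + 1) (by omega)]
      have hdrop : primes.drop k = primes[k] :: primes.drop (k + 1) :=
        List.drop_eq_getElem_cons hlt
      rw [hdrop]
      simp [specAll]

-- ---- B-side abstract state ----

-- row i's full takeWhile list: right factors of primes[i] up to the first over-limit product
def Wr (primes : List Int) (max_v : Int) (i : Nat) : List Int :=
  (primes.drop (i + 1)).takeWhile (fun q => decide (primes.getD i 0 * q ≤ max_v))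

-- row i's bucket after the sweep has processed right factors j = 1..m
def rowB (primes : List Int) (max_v : Int) (m i : Nat) : List (Int × Int) :=
  ((Wr primes max_v i).take (m - i)).map (fun q => (primes.getD i 0, q))

def blocksOf (primes : List Int) (max_v : Int) (m : Nat) : List (List (Int × Int)) :=
  (List.range (primes.length - 1)).map (rowB primes max_v m)

def aliveN (primes : List Int) (max_v : Int) (m : Nat) : List Nat :=
  (List.range m).filter (fun i => decide (m - i ≤ (Wr primes max_v i).length))

def aliveOf (primes : List Int) (max_v : Int) (m : Nat) : List Int :=
  (aliveN primes max_v m).map Int.ofNat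

theorem succ_le_takeWhile_iff (p : Int → Bool) :
    ∀ (l : List Int) (k : Nat) (hk : k < l.length),
      (k + 1 ≤ (l.takeWhile p).length ↔ (k ≤ (l.takeWhile p).length ∧ p (l[k]'hk) = true)) := by
  intro l
  induction l with
  | nil => intro k hk; simp at hk
  | cons x xs ih =>
    intro k hk
    cases hx : p x with
    | true =>
      rw [List.takeWhile_cons_of_pos hx]
      cases k with
      | zero => simp [hx]
      | succ j =>
        simp only [List.length_cons, List.getElem_cons_succ]
        have hj : j < xs.length := by simpa using hk
        have hiff := ih j hj
        constructor
        · intro hle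
          have h1 : j + 1 ≤ (List.takeWhile p xs).length := by omega
          exact ⟨by omega, (hiff.mp h1).2⟩
        · rintro ⟨h1, h2⟩
          have := hiff.mpr ⟨by omega, h2⟩
          omega
    | false =>
      rw [List.takeWhile_cons_of_neg (by simp [hx])]
      cases k with
      | zero => simp [hx]
      | succ j => simp

theorem getElem_takeWhile (p : Int → Bool) (l : List Int) (k : Nat)
    (hk : k < (l.takeWhile p).length) (hl : k < l.length) :
    (l.takeWhile p)[k] = l[k]'hl :=
  (List.takeWhile_prefix p).getElem hk

-- the state update applied to one live row
def updB (primes : List Int) (max_v q : Int) (b : List (List (Int × Int))) (i : Nat) :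
    List (List (Int × Int)) :=
  if primes.getD i 0 * q ≤ max_v then b.modify i (fun x => x ++ [(primes.getD i 0, q)]) else b

-- the inner fold over a cast Nat index list, split into the blocks update and the survivor filter
theorem innerB_fold (primes : List Int) (max_v q : Int) :
    ∀ (L : List Nat) (B : List (List (Int × Int))) (acc : List Int),
      (L.map Int.ofNat).foldl (innerStepB primes max_v q) (B, acc)
        = (L.foldl (updB primes max_v q) B,
           acc ++ (L.filter (fun i => decide (primes.getD i 0 * q ≤ max_v))).map Int.ofNat) := by
  intro L
  induction L with
  | nil => intro B acc; simp
  | cons i rest ih =>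
    intro B acc
    simp only [List.map_cons, List.foldl_cons, List.filter_cons]
    by_cases h : primes.getD i 0 * q ≤ max_v
    · have hstep : innerStepB primes max_v q (B, acc) (Int.ofNat i)
          = (B.modify i (fun b => b ++ [(primes.getD i 0, q)]), acc ++ [Int.ofNat i]) := by
        unfold innerStepB
        rw [Int.ofNat_eq_natCast, PySem.List.pyGetD_natCast, if_pos h]
        simp
      rw [hstep, ih,
        show updB primes max_v q B i = B.modify i (fun x => x ++ [(primes.getD i 0, q)]) from by
          unfold updB; rw [if_pos h],
        if_pos (show decide (primes.getD i 0 * q ≤ max_v) = true by simpa using h)]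
      simp
    · have hstep : innerStepB primes max_v q (B, acc) (Int.ofNat i) = (B, acc) := by
        unfold innerStepB
        rw [Int.ofNat_eq_natCast, PySem.List.pyGetD_natCast, if_neg h]
      rw [hstep, ih,
        show updB primes max_v q B i = B from by unfold updB; rw [if_neg h],
        if_neg (show ¬ decide (primes.getD i 0 * q ≤ max_v) = true by simpa using h)]

theorem updB_fold_getElem? (primes : List Int) (max_v q : Int) :
    ∀ (L : List Nat), L.Nodup → ∀ (B : List (List (Int × Int))) (j : Nat),
      (L.foldl (updB primes max_v q) B)[j]?
        = if j ∈ L ∧ primes.getD j 0 * q ≤ max_v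
          then (B[j]?).map (· ++ [(primes.getD j 0, q)]) else B[j]? := by
  intro L
  induction L with
  | nil => intro _ B j; simp
  | cons i rest ih =>
    intro hnd B j
    have hni : i ∉ rest := (List.nodup_cons.mp hnd).1
    rw [List.foldl_cons, ih (List.nodup_cons.mp hnd).2]
    have hBij : (updB primes max_v q B i)[j]?
        = if j = i ∧ primes.getD j 0 * q ≤ max_v
          then (B[j]?).map (· ++ [(primes.getD j 0, q)]) else B[j]? := by
      unfold updB
      by_cases h : primes.getD i 0 * q ≤ max_v
      · rw [if_pos h, List.getElem?_modify]
        by_cases hji : j = i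
        · subst hji
          rw [if_pos ⟨rfl, h⟩]
          cases B[j]? <;> simp
        · rw [if_neg (fun hc => hji hc.1)]
          cases hB : B[j]? <;> simp [Ne.symm hji]
      · rw [if_neg h, if_neg (by rintro ⟨rfl, hc⟩; exact h hc)]
    by_cases hjr : j ∈ rest
    · have hji : ¬ j = i := fun hc => hni (hc ▸ hjr)
      by_cases hk : primes.getD j 0 * q ≤ max_v
      · rw [if_pos ⟨hjr, hk⟩, if_pos ⟨by simp [hjr], hk⟩, hBij, if_neg (fun hc => hji hc.1)]
      · rw [if_neg (fun hc => hk hc.2), if_neg (fun hc => hk hc.2), hBij,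
          if_neg (fun hc => hk hc.2)]
    · rw [if_neg (fun hc => hjr hc.1), hBij]
      by_cases hji : j = i
      · subst hji
        by_cases hk : primes.getD j 0 * q ≤ max_v
        · rw [if_pos ⟨rfl, hk⟩, if_pos ⟨by simp, hk⟩]
        · rw [if_neg (fun hc => hk hc.2), if_neg (fun hc => hk hc.2)]
      · rw [if_neg (fun hc => hji hc.1),
          if_neg (by
            rintro ⟨hc, hk⟩
            rcases List.mem_cons.mp hc with h1 | h1
            · exact hji h1
            · exact hjr h1)]

theorem aliveN_nodup (primes : List Int) (max_v : Int) (m : Nat) :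
    (aliveN primes max_v m).Nodup :=
  List.Nodup.filter _ List.nodup_range

theorem mem_aliveN (primes : List Int) (max_v : Int) (m i : Nat) :
    i ∈ aliveN primes max_v m ↔ (i < m ∧ m - i ≤ (Wr primes max_v i).length) := by
  simp [aliveN, List.mem_filter]

-- the one-step state lemma: processing j = m+1 advances the abstract state from m to m+1
theorem outerStepB_state (primes : List Int) (max_v : Int) (m : Nat)
    (h : m + 1 < primes.length) :
    outerStepB primes max_v (blocksOf primes max_v m, aliveOf primes max_v m) ((m + 1 : Nat) : Int)
      = (blocksOf primes max_v (m + 1), aliveOf primes max_v (m + 1)) := by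
  have hq : PySem.List.pyGetD primes ((m + 1 : Nat) : Int) 0 = primes[m + 1] := by
    rw [PySem.List.pyGetD_natCast, List.getD_eq_getElem _ _ h]
  have hWnext : ∀ i : Nat, i ≤ m →
      ((m + 1) - i ≤ (Wr primes max_v i).length ↔
        (m - i ≤ (Wr primes max_v i).length ∧ primes.getD i 0 * primes[m + 1] ≤ max_v)) := by
    intro i hi
    have hlen : m - i < (primes.drop (i + 1)).length := by rw [List.length_drop]; omega
    have hget : (primes.drop (i + 1))[m - i]'hlen = primes[m + 1] := by
      rw [List.getElem_drop]
      congr 1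
      omega
    have hiff := succ_le_takeWhile_iff (fun q => decide (primes.getD i 0 * q ≤ max_v))
      (primes.drop (i + 1)) (m - i) hlen
    rw [hget] at hiff
    have harith : (m + 1) - i = (m - i) + 1 := by omega
    rw [harith]
    unfold Wr
    simp only [decide_eq_true_eq] at hiff
    exact hiff
  unfold outerStepB
  simp only [hq]
  have hsnoc : (aliveOf primes max_v m) ++ [((m + 1 : Nat) : Int) - 1]
      = ((aliveN primes max_v m ++ [m]).map Int.ofNat) := by
    rw [List.map_append, aliveOf]
    congr 1
    simp only [List.map_cons, List.map_nil]
    congr 1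
    rw [Int.ofNat_eq_natCast]
    push_cast
    ring
  rw [hsnoc, innerB_fold]
  have hLnd : (aliveN primes max_v m ++ [m]).Nodup := by
    refine List.Nodup.append (aliveN_nodup primes max_v m) (List.nodup_singleton m) ?_
    intro a ha hb
    rw [List.mem_singleton] at hb
    have := ((mem_aliveN primes max_v m a).mp ha).1
    omega
  have hmem : ∀ j : Nat, j ∈ aliveN primes max_v m ++ [m] ↔
      (j ≤ m ∧ m - j ≤ (Wr primes max_v j).length) := by
    intro j
    rw [List.mem_append, List.mem_singleton, mem_aliveN]
    constructor
    · rintro (⟨h1, h2⟩ | rfl)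
      · exact ⟨le_of_lt h1, h2⟩
      · exact ⟨le_refl _, by omega⟩
    · rintro ⟨h1, h2⟩
      rcases lt_or_eq_of_le h1 with h1' | h1'
      · exact Or.inl ⟨h1', h2⟩
      · exact Or.inr h1'
  rw [Prod.mk.injEq]
  constructor
  · -- blocks component
    apply List.ext_getElem?
    intro j
    rw [updB_fold_getElem? primes max_v primes[m + 1] _ hLnd _ j]
    by_cases hjr : j < primes.length - 1
    · simp only [blocksOf, List.getElem?_map, List.getElem?_range hjr, Option.map_some]
      by_cases hjm : j ≤ m
      · have hiff := hWnext j hjm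
        by_cases halive : m - j ≤ (Wr primes max_v j).length
        · by_cases hk : primes.getD j 0 * primes[m + 1] ≤ max_v
          · rw [if_pos ⟨(hmem j).mpr ⟨hjm, halive⟩, hk⟩]
            simp only [Option.some.injEq]
            -- extend the row by one pair
            have hext : (m + 1) - j ≤ (Wr primes max_v j).length := hiff.mpr ⟨halive, hk⟩
            have hlt : m - j < (Wr primes max_v j).length := by omega
            unfold rowB
            rw [show (m + 1) - j = (m - j) + 1 by omega, List.take_add_one]
            have hlen2 : m - j < (primes.drop (j + 1)).length := by
              rw [List.length_drop]; omega
            have hWget : (Wr primes max_v j)[m - j]'hlt = primes[m + 1] := by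
              unfold Wr at hlt ⊢
              rw [getElem_takeWhile _ _ _ hlt hlen2, List.getElem_drop]
              congr 1
              omega
            rw [List.getElem?_eq_getElem hlt, hWget]
            simp
          · rw [if_neg (fun hc => hk hc.2)]
            have hstop : ¬ ((m + 1) - j ≤ (Wr primes max_v j).length) :=
              fun hc => hk (hiff.mp hc).2
            unfold rowB
            rw [List.take_of_length_le (by omega), List.take_of_length_le (by omega)]
        · rw [if_neg (fun hc => halive ((hmem j).mp hc.1).2)]
          unfold rowB
          rw [List.take_of_length_le (by omega), List.take_of_length_le (by omega)]
      · rw [if_neg (fun hc => hjm ((hmem j).mp hc.1).1)]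
        unfold rowB
        rw [show m - j = 0 by omega, show (m + 1) - j = 0 by omega]
    · have h1 : (blocksOf primes max_v m)[j]? = none := by
        simp only [blocksOf, List.getElem?_map]
        rw [List.getElem?_eq_none (by simpa using Nat.le_of_not_lt hjr)]
        rfl
      have h2 : (blocksOf primes max_v (m + 1))[j]? = none := by
        simp only [blocksOf, List.getElem?_map]
        rw [List.getElem?_eq_none (by simpa using Nat.le_of_not_lt hjr)]
        rfl
      rw [h1, h2]
      split <;> rfl
  · -- alive component
    rw [List.nil_append]
    have hfilter : (aliveN primes max_v m ++ [m]).filter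
          (fun i => decide (primes.getD i 0 * primes[m + 1] ≤ max_v))
        = aliveN primes max_v (m + 1) := by
      rw [List.filter_append]
      have h1 : (aliveN primes max_v m).filter
            (fun i => decide (primes.getD i 0 * primes[m + 1] ≤ max_v))
          = (List.range m).filter
              (fun i => decide ((m + 1) - i ≤ (Wr primes max_v i).length)) := by
        unfold aliveN
        rw [List.filter_filter]
        apply List.filter_congr
        intro i hi
        rw [List.mem_range] at hi
        have hiff := hWnext i (le_of_lt hi)
        by_cases ha : (m + 1) - i ≤ (Wr primes max_v i).length
        · rw [decide_eq_true (hiff.mp ha).2, decide_eq_true (hiff.mp ha).1,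
            decide_eq_true ha]
          rfl
        · rcases not_and_or.mp (fun hc => ha (hiff.mpr hc)) with hb | hb
          · rw [decide_eq_false hb, Bool.and_false, decide_eq_false ha]
          · rw [decide_eq_false hb, Bool.false_and, decide_eq_false ha]
      have h2 : [m].filter (fun i => decide (primes.getD i 0 * primes[m + 1] ≤ max_v))
          = [m].filter (fun i => decide ((m + 1) - i ≤ (Wr primes max_v i).length)) := by
        apply List.filter_congr
        intro i hi
        rw [List.mem_singleton] at hi
        rw [hi]
        have hiff := hWnext m (le_refl m)
        by_cases hk : primes.getD m 0 * primes[m + 1] ≤ max_v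
        · rw [decide_eq_true hk, decide_eq_true (hiff.mpr ⟨by omega, hk⟩)]
        · rw [decide_eq_false hk, decide_eq_false (fun hc => hk (hiff.mp hc).2)]
      rw [h1, h2]
      unfold aliveN
      rw [← List.filter_append, ← List.range_succ]
    rw [hfilter]
    rfl


-- the outer fold carries the abstract state from m to the end
theorem outerB_fold (primes : List Int) (max_v : Int) :
    ∀ m : Nat, m ≤ primes.length - 1 →
      (PySem.List.pyRange ((m + 1 : Nat) : Int) (primes.length : Int) 1).foldl
          (outerStepB primes max_v) (blocksOf primes max_v m, aliveOf primes max_v m)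
        = (blocksOf primes max_v (primes.length - 1), aliveOf primes max_v (primes.length - 1)) := by
  intro m hm
  induction h : (primes.length - 1) - m generalizing m with
  | zero =>
    have hm' : m = primes.length - 1 := by omega
    subst hm'
    rw [PySem.List.pyRange_one_eq_nil (by omega)]
    rfl
  | succ s ih =>
    have hlt : m + 1 < primes.length := by omega
    rw [PySem.List.pyRange_one_cons (by exact_mod_cast hlt), List.foldl_cons,
      outerStepB_state primes max_v m hlt]
    have hstep : ((m + 1 : Nat) : Int) + 1 = ((m + 2 : Nat) : Int) := by push_cast; ring
    rw [hstep]
    exact ih (m + 1) (by omega) (by omega)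

theorem blocksOf_zero (primes : List Int) (max_v : Int) :
    primes.dropLast.map (fun _ => ([] : List (Int × Int))) = blocksOf primes max_v 0 := by
  unfold blocksOf rowB
  rw [show (fun _ : Int => ([] : List (Int × Int))) = Function.const Int [] from rfl,
    List.map_const, List.length_dropLast]
  apply List.ext_getElem
  · simp
  · intro i h1 h2
    simp

theorem specPairs_eq_takeWhile (max_v p : Int) (l : List Int) :
    specPairs max_v p l = (l.takeWhile (fun q => decide (p * q ≤ max_v))).map (fun q => (p, q)) := by
  induction l with
  | nil => rfl
  | cons q qs ih =>
    simp only [specPairs, List.takeWhile_cons]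
    by_cases h : p * q > max_v
    · rw [if_pos h, if_neg (by simp only [decide_eq_true_eq]; omega)]
      rfl
    · rw [if_neg h, if_pos (by simp only [decide_eq_true_eq]; omega)]
      rw [List.map_cons, ih]

theorem specAll_eq_flatten (max_v : Int) :
    ∀ primes : List Int,
      specAll max_v primes
        = ((List.range primes.length).map
            (fun i => ((Wr primes max_v i)).map (fun q => (primes.getD i 0, q)))).flatten := by
  intro primes
  induction primes with
  | nil => rfl
  | cons p rest ih =>
    simp only [specAll, List.length_cons, List.range_succ_eq_map, List.map_cons, List.flatten_cons,
      List.map_map]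
    congr 1
    · unfold Wr
      simp only [List.getD_cons_zero, List.drop_succ_cons, List.drop_zero]
      exact specPairs_eq_takeWhile max_v p rest

theorem flatten_blocks_final (primes : List Int) (max_v : Int) :
    (blocksOf primes max_v (primes.length - 1)).flatten = specAll max_v primes := by
  rw [specAll_eq_flatten]
  unfold blocksOf
  have hrow : ∀ i ∈ List.range (primes.length - 1),
      rowB primes max_v (primes.length - 1) i
        = (Wr primes max_v i).map (fun q => (primes.getD i 0, q)) := by
    intro i hi
    rw [List.mem_range] at hi
    unfold rowB
    congr 1
    apply List.take_of_length_le
    have h1 : (Wr primes max_v i).length ≤ (primes.drop (i + 1)).length :=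
      (List.takeWhile_prefix _).length_le
    rw [List.length_drop] at h1
    omega
  rw [List.map_congr_left hrow]
  rcases Nat.eq_zero_or_pos primes.length with h0 | h1
  · rw [h0]
  · have hn : List.range primes.length = List.range (primes.length - 1) ++ [primes.length - 1] := by
      rw [← List.range_succ]
      congr 1
      omega
    rw [hn, List.map_append, List.flatten_append]
    have hW0 : Wr primes max_v (primes.length - 1) = [] := by
      unfold Wr
      rw [show primes.length - 1 + 1 = primes.length by omega, List.drop_length]
      rfl
    simp [hW0]

-- ===== VERDICT (by name: the statement is the Claim_ definition above) =====
theorem prime_combinations_spec : Claim_equal_prime_combinations := by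
  intro primes max_v _
  show prime_combinations primes max_v = prime_combinations_alt primes max_v
  unfold prime_combinations prime_combinations_alt
  have hA := outerA_eq max_v primes 0 [] (by omega)
  simp only [Nat.cast_zero, List.drop_zero, List.nil_append] at hA
  rw [hA]
  have hB := outerB_fold primes max_v 0 (by omega)
  norm_num at hB
  rw [blocksOf_zero primes max_v,
    show ([] : List Int) = aliveOf primes max_v 0 from rfl, hB]
  exact (flatten_blocks_final primes max_v).symm
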